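-- pv_equiv track=rewrite | github.com/adikulkarni11/A-Magical-Code | agents/agent7.py | set_checksum
-- ===== SOURCE A (Python) =====
-- def set_checksum(num, base=10):
--     num_bin = bin(num)[2:]
--     chunk_len = 5
--     checksum = 0
--     mod_prime = 113
--     # From wikipedia - rollin hash
--     # ASCII a = 97, b = 98, r = 114.
--     # hash("abr") =  [ ( [ ( [  (97 × 256) % 101 + 98 ] % 101 ) × 256 ] %  101 ) + 114 ]   % 101   =  4
--     while len(num_bin) > 0:
--         bin_chunk = num_bin[:chunk_len]
--         num_bin = num_bin[chunk_len:]
--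
--         num_chunk = int(bin_chunk, 2)
--         checksum = ((checksum + num_chunk) * base) % mod_prime
--         # if len(num_bin) > 0:
--         #     checksum = (checksum * base) % mod_prime
--     return checksum
-- ===== SOURCE B (Python) =====
-- def set_checksum(num, base=10):
--     # Arithmetic re-implementation: instead of slicing the binary string left-to-right
--     # and Horner-updating the checksum, extract the 5-bit chunks from the LOW end of the
--     # number with % and // and accumulate them against a running power of the base.
--     if num < 0:
--         # chunking by bit_length is only meaningful for nonnegative numbers;
--         # A likewise raises ValueError here (int('b...', 2))
--         raise ValueError("set_checksum requires a nonnegative number")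
--     mod_prime = 113
--     n = num
--     rem = max(n.bit_length(), 1)
--     acc = 0
--     power = base
--     while rem > 0:
--         w = rem % 5 or 5          # width of the current (rightmost remaining) chunk
--         d = 1 << w
--         acc = (acc + (n % d) * power) % mod_prime
--         n //= d
--         power = (power * base) % mod_prime
--         rem -= w
--     return acc
-- ===== Notes on version B (the rewrite author's own statement) =====
-- stated objective: alternative
-- what changed: A builds the binary string of num and Horner-updates the checksum over 5-bit slices left-to-right; B never builds a string: it extracts the same 5-bit chunks arithmetically from the low end with % and // and accumulates them right-to-left against a running power of the base mod 113.
import Mathlib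
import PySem

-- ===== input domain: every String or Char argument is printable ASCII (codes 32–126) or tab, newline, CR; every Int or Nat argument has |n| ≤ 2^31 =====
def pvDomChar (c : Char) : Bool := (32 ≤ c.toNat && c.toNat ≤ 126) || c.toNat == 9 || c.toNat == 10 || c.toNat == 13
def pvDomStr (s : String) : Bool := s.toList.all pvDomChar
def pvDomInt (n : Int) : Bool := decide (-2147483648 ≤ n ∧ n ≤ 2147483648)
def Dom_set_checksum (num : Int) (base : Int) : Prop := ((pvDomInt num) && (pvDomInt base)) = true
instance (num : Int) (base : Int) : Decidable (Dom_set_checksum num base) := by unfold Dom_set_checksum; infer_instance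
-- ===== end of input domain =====

-- B replaces A's left-to-right Horner pass over 5-bit slices of the binary STRING by a
-- pure-arithmetic right-to-left pass (chunks extracted with % and //, running power of base);
-- same value, different decomposition ('alternative'). Both raise on num < 0 (outside Pre_).

-- ===== PORT A =====
-- bin(n) without the '0b' prefix, msb first ([] for 0; pvBin adds the '0' digit Python prints)
def pvBinGo (n : Nat) : List Char :=
  if h : n = 0 then []
  else pvBinGo (n / 2) ++ [if n % 2 = 1 then '1' else '0']
termination_by n
decreasing_by exact Nat.div_lt_self (Nat.pos_of_ne_zero h) (by norm_num)

def pvBin (n : Nat) : List Char := if n = 0 then ['0'] else pvBinGo n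

-- int(s, 2) on a '0'/'1' string (exact there; A only feeds it slices of bin(num))
def pvChunkVal (l : List Char) : Int :=
  l.foldl (fun a c => 2 * a + (if c = '1' then 1 else 0)) 0

-- the while-loop of A: slice 5 chars off the front, Horner-update the checksum mod 113
def pvALoop (base : Int) (bs : List Char) (chk : Int) : Int :=
  if h : bs = [] then chk
  else pvALoop base (bs.drop 5)
        (PySem.Int.mod ((chk + pvChunkVal (bs.take 5)) * base) 113)
termination_by bs.length
decreasing_by have := List.length_pos_iff.mpr h; simp; omega

def set_checksum (num : Int) (base : Int) : Int :=
  pvALoop base (pvBin num.toNat) 0   -- num ≥ 0 under Pre_, so toNat is exact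

-- ===== PORT B =====
-- the while-loop of B: rem bits remain; take the rightmost chunk (width = rem % 5 or 5)
-- with % and //, accumulate it times the running power of base
def pvBLoop (base : Int) (rem : Nat) (n acc power : Int) : Int :=
  if h : rem = 0 then acc
  else
    pvBLoop base (rem - (if rem % 5 = 0 then 5 else rem % 5)) (PySem.Int.floordiv n ((2 ^ (if rem % 5 = 0 then 5 else rem % 5) : Nat) : Int))
      (PySem.Int.mod (acc + (PySem.Int.mod n ((2 ^ (if rem % 5 = 0 then 5 else rem % 5) : Nat) : Int)) * power) 113)
      (PySem.Int.mod (power * base) 113)   -- w = rem % 5 or 5; d = 1 << w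
termination_by rem
decreasing_by split <;> omega

-- B's raise on num < 0 lies outside Pre_set_checksum; the loop below is B's code for num ≥ 0
def set_checksum_alt (num : Int) (base : Int) : Int :=
  pvBLoop base (max (PySem.Int.bitLength num) 1) num 0 base

-- ===== PRECONDITION & SPEC =====
-- Pre_ excludes num < 0: there bin(num)[2:] starts with 'b' and int(chunk, 2) raises ValueError
-- in A, and B raises ValueError there too.
def Pre_set_checksum (num : Int) (base : Int) : Prop := 0 ≤ num
instance (num : Int) (base : Int) : Decidable (Pre_set_checksum num base) := by
  unfold Pre_set_checksum; infer_instance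

def pvWitness_set_checksum : Int × Int := (10, 10)

def Spec_set_checksum (num : Int) (base : Int) (out : Int) : Prop := out = set_checksum_alt num base
instance (num : Int) (base : Int) (out : Int) : Decidable (Spec_set_checksum num base out) := by
  unfold Spec_set_checksum; infer_instance

-- ===== CLAIM (what is proved, stated in full; the proofs are below) =====
def Claim_equal_set_checksum : Prop := ∀ (num : Int) (base : Int), Dom_set_checksum num base → Pre_set_checksum num base → Spec_set_checksum num base (set_checksum num base)

-- ===== LEMMAS AND PROOFS =====

-- proof-side abstractions: pvW = little-endian base-`base` value of a chunk list,
-- pvF = A's fold without the mods, pvH = A's loop on the chunk list, pvG = B's loop on the chunk list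
def pvW (base : Int) : List Int → Int
  | [] => 0
  | c :: l => c + base * pvW base l

def pvF (base : Int) (cs : List Int) (chk : Int) : Int :=
  cs.foldl (fun a c => (a + c) * base) chk

def pvH (base : Int) : List Int → Int → Int
  | [], chk => chk
  | c :: cs, chk => pvH base cs (((chk + c) * base) % 113)

def pvG (base : Int) : List Int → Int → Int → Int
  | [], acc, _ => acc
  | c :: l, acc, p => pvG base l ((acc + c * p) % 113) ((p * base) % 113)

def pvChunks (bs : List Char) : List Int :=
  if h : bs = [] then [] else pvChunkVal (bs.take 5) :: pvChunks (bs.drop 5)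
termination_by bs.length
decreasing_by have := List.length_pos_iff.mpr h; simp; omega

def pvBits (l : List Char) : Prop := ∀ c ∈ l, c = '0' ∨ c = '1'

lemma pvCV_foldl (l : List Char) (a : Int) :
    l.foldl (fun a c => 2 * a + (if c = '1' then 1 else 0)) a
      = a * 2 ^ l.length + pvChunkVal l := by
  induction l generalizing a with
  | nil => simp [pvChunkVal]
  | cons c l ih =>
    have e1 := ih (2 * a + if c = '1' then 1 else 0)
    have e2 := ih (2 * 0 + if c = '1' then 1 else 0)
    simp only [pvChunkVal, List.foldl_cons, List.length_cons] at *
    rw [e1, e2]; ring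

lemma pvCV_append (l1 l2 : List Char) :
    pvChunkVal (l1 ++ l2) = pvChunkVal l1 * 2 ^ l2.length + pvChunkVal l2 := by
  rw [pvChunkVal, List.foldl_append, pvCV_foldl]
  rfl

lemma pvCV_bounds (l : List Char) (hb : pvBits l) :
    0 ≤ pvChunkVal l ∧ pvChunkVal l < 2 ^ l.length := by
  induction l with
  | nil => simp [pvChunkVal]
  | cons c l ih =>
    have hbl : pvBits l := fun x hx => hb x (List.mem_cons_of_mem _ hx)
    have ihl := ih hbl
    have : pvChunkVal (c :: l)
        = (if c = '1' then 1 else 0) * 2 ^ l.length + pvChunkVal l := by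
      rw [pvChunkVal, List.foldl_cons, pvCV_foldl]; ring_nf
    rw [this]
    rcases hb c (List.mem_cons_self) with h | h <;> simp [h, List.length_cons, pow_succ] <;> constructor <;> nlinarith [ihl.1, ihl.2]

lemma pvBinGo_val (n : Nat) : pvChunkVal (pvBinGo n) = (n : Int) := by
  induction n using Nat.strong_induction_on with
  | _ n ih =>
    rw [pvBinGo]
    by_cases h : n = 0
    · simp [h, pvChunkVal]
    · simp only [h, dite_false]
      rw [pvCV_append, ih (n / 2) (Nat.div_lt_self (Nat.pos_of_ne_zero h) (by norm_num))]
      have h2 := Nat.div_add_mod n 2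
      by_cases hm : n % 2 = 1 <;> simp [pvChunkVal, hm] <;> omega

lemma pvBinGo_len (n : Nat) : (pvBinGo n).length = PySem.Int.bitLength (n : Int) := by
  induction n using Nat.strong_induction_on with
  | _ n ih =>
    rw [pvBinGo]
    by_cases h : n = 0
    · simp [h, PySem.Int.bitLength_zero]
    · simp only [h, dite_false, List.length_append, List.length_singleton]
      rw [ih (n / 2) (Nat.div_lt_self (Nat.pos_of_ne_zero h) (by norm_num)),
        PySem.Int.bitLength_natCast (Nat.pos_of_ne_zero h)]

lemma pvBinGo_bits (n : Nat) : pvBits (pvBinGo n) := by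
  induction n using Nat.strong_induction_on with
  | _ n ih =>
    rw [pvBinGo]
    by_cases h : n = 0
    · simp [h, pvBits]
    · simp only [h, dite_false]
      intro c hc
      rcases List.mem_append.mp hc with hc | hc
      · exact ih (n / 2) (Nat.div_lt_self (Nat.pos_of_ne_zero h) (by norm_num)) c hc
      · simp only [List.mem_singleton] at hc
        subst hc; split <;> simp

lemma pvBin_ne (n : Nat) : pvBin n ≠ [] := by
  rw [pvBin]; split
  · simp
  · rename_i h
    rw [pvBinGo]; simp [h]

lemma pvBin_val (n : Nat) : pvChunkVal (pvBin n) = (n : Int) := by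
  rw [pvBin]; split
  · rename_i h; simp [h, pvChunkVal]
  · exact pvBinGo_val n

lemma pvBin_bits (n : Nat) : pvBits (pvBin n) := by
  rw [pvBin]; split
  · intro c hc; simp only [List.mem_singleton] at hc; simp [hc]
  · exact pvBinGo_bits n

lemma pvBin_len (n : Nat) : (pvBin n).length = max (PySem.Int.bitLength (n : Int)) 1 := by
  rw [pvBin]; split
  · rename_i h; simp [h, PySem.Int.bitLength_zero]
  · rename_i h
    rw [pvBinGo_len, PySem.Int.bitLength_natCast (Nat.pos_of_ne_zero h)]
    omega

lemma pvChunks_append (l1 l2 : List Char) (h1 : l1.length % 5 = 0)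
    (h2a : 1 ≤ l2.length) (h2b : l2.length ≤ 5) :
    pvChunks (l1 ++ l2) = pvChunks l1 ++ [pvChunkVal l2] := by
  induction hn : l1.length using Nat.strong_induction_on generalizing l1 with
  | _ n ih =>
    by_cases h : l1 = []
    · subst h
      rw [pvChunks, pvChunks]
      have hne : l2 ≠ [] := by intro hh; subst hh; simp at h2a
      simp [hne, List.take_of_length_le h2b, List.drop_eq_nil_of_le h2b, pvChunks]
    · have hl5 : 5 ≤ l1.length := by
        have := List.length_pos_iff.mpr h; omega
      have hne1 : l1 ++ l2 ≠ [] := by simp [h]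
      conv_lhs => rw [pvChunks]
      conv_rhs => rw [pvChunks]
      simp only [hne1, h, dite_false]
      rw [List.take_append_of_le_length hl5, List.drop_append_of_le_length hl5]
      rw [ih (l1.drop 5).length (by simp; omega) _ (by simp; omega) rfl]
      simp

lemma pvALoop_eq_H (base : Int) (bs : List Char) (chk : Int) :
    pvALoop base bs chk = pvH base (pvChunks bs) chk := by
  induction hn : bs.length using Nat.strong_induction_on generalizing bs chk with
  | _ n ih =>
    rw [pvALoop, pvChunks]
    by_cases h : bs = []
    · simp [h, pvH]
    · simp only [h, dite_false]
      rw [ih (bs.drop 5).length (by have := List.length_pos_iff.mpr h; simp; omega) _ _ rfl,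
        pvH, PySem.Int.mod_eq_emod_of_pos (by norm_num : (0:Int) < 113)]

lemma pv_emod_cong1 (x c b : Int) : ((x % 113 + c) * b) % 113 = ((x + c) * b) % 113 := by
  conv_lhs => rw [Int.mul_emod, Int.add_emod, Int.emod_emod_of_dvd x dvd_rfl]
  rw [← Int.add_emod, ← Int.mul_emod]

lemma pv_emod_cong2 (a b w : Int) : (a % 113 + b % 113 * w) % 113 = (a + b * w) % 113 := by
  conv_lhs => rw [Int.add_emod, Int.mul_emod, Int.emod_emod_of_dvd a dvd_rfl,
    Int.emod_emod_of_dvd b dvd_rfl]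
  rw [← Int.mul_emod, ← Int.add_emod]

lemma pvF_emod (base : Int) (cs : List Int) (x : Int) :
    pvF base cs (x % 113) % 113 = pvF base cs x % 113 := by
  induction cs generalizing x with
  | nil => simp [pvF, Int.emod_emod_of_dvd x (dvd_refl (113:Int))]
  | cons c cs ih =>
    show pvF base cs ((x % 113 + c) * base) % 113 = pvF base cs ((x + c) * base) % 113
    rw [← ih ((x % 113 + c) * base), pv_emod_cong1, ih]

lemma pvH_eq (base : Int) (cs : List Int) (chk : Int) (h : cs ≠ []) :
    pvH base cs chk = pvF base cs chk % 113 := by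
  induction cs generalizing chk with
  | nil => exact absurd rfl h
  | cons c cs ih =>
    by_cases hcs : cs = []
    · subst hcs; simp [pvH, pvF]
    · rw [pvH, ih _ hcs]
      show pvF base cs ((chk + c) * base % 113) % 113 = pvF base (c :: cs) chk % 113
      rw [pvF_emod]
      rfl

lemma pvW_append (base : Int) (l : List Int) (c : Int) :
    pvW base (l ++ [c]) = pvW base l + base ^ l.length * c := by
  induction l with
  | nil => simp [pvW]
  | cons d l ih =>
    simp only [List.cons_append, pvW, ih, List.length_cons]
    ring

lemma pvF_closed (base : Int) (cs : List Int) (chk : Int) :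
    pvF base cs chk = chk * base ^ cs.length + base * pvW base cs.reverse := by
  induction cs generalizing chk with
  | nil => simp [pvF, pvW]
  | cons c cs ih =>
    show pvF base cs ((chk + c) * base) = _
    rw [ih, List.reverse_cons, pvW_append]
    simp only [List.length_cons, List.length_reverse]
    ring

lemma pvG_eq (base : Int) (l : List Int) (acc p : Int) (h : l ≠ []) :
    pvG base l acc p = (acc + p * pvW base l) % 113 := by
  induction l generalizing acc p with
  | nil => exact absurd rfl h
  | cons c l ih =>
    by_cases hl : l = []
    · subst hl
      show (acc + c * p) % 113 = _
      rw [pvW, pvW]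
      congr 1; ring
    · rw [pvG, ih _ _ hl, pv_emod_cong2, pvW]
      congr 1; ring

lemma pvBits_sub {l1 l2 : List Char} (h : pvBits l2) (hs : ∀ c ∈ l1, c ∈ l2) : pvBits l1 :=
  fun c hc => h c (hs c hc)

lemma pvBLoop_eq_G (base : Int) (bs : List Char) (acc p : Int)
    (hne : bs ≠ []) (hb : pvBits bs) :
    pvBLoop base bs.length (pvChunkVal bs) acc p = pvG base (pvChunks bs).reverse acc p := by
  induction hn : bs.length using Nat.strong_induction_on generalizing bs acc p with
  | _ n ih =>
    subst hn
    have hL : 0 < bs.length := List.length_pos_iff.mpr hne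
    set L := bs.length with hLdef
    set w : Nat := if L % 5 = 0 then 5 else L % 5 with hwdef
    have hw1 : 1 ≤ w := by rw [hwdef]; split <;> omega
    have hwL : w ≤ L := by rw [hwdef]; split <;> omega
    set bs1 := bs.take (L - w) with hbs1
    set bs2 := bs.drop (L - w) with hbs2
    have hsplit : bs1 ++ bs2 = bs := List.take_append_drop _ _
    have hlen1 : bs1.length = L - w := by rw [hbs1, List.length_take]; omega
    have hlen2 : bs2.length = w := by rw [hbs2, List.length_drop]; omega
    have hw5 : w ≤ 5 := by rw [hwdef]; split <;> omega
    have h1mod : bs1.length % 5 = 0 := by rw [hlen1, hwdef]; split <;> omega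
    have hb2 : pvBits bs2 := pvBits_sub hb (fun c hc => by
      rw [← hsplit]; exact List.mem_append.mpr (Or.inr hc))
    have hb1 : pvBits bs1 := pvBits_sub hb (fun c hc => by
      rw [← hsplit]; exact List.mem_append.mpr (Or.inl hc))
    have hcv : pvChunkVal bs = pvChunkVal bs1 * 2 ^ w + pvChunkVal bs2 := by
      rw [← hsplit, pvCV_append, hlen2]
    have hbnd := pvCV_bounds bs2 hb2
    rw [hlen2] at hbnd
    have hDpos : (0:Int) < ((2 ^ w : Nat) : Int) := by positivity
    have hDcast : ((2 ^ w : Nat) : Int) = (2:Int) ^ w := by push_cast; ring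
    have hmod : PySem.Int.mod (pvChunkVal bs) ((2 ^ w : Nat) : Int) = pvChunkVal bs2 := by
      rw [PySem.Int.mod_eq_emod_of_pos hDpos, hcv, hDcast, add_comm,
        Int.add_mul_emod_self_right _ _ _, Int.emod_eq_of_lt hbnd.1 hbnd.2]
    have hdiv : PySem.Int.floordiv (pvChunkVal bs) ((2 ^ w : Nat) : Int) = pvChunkVal bs1 := by
      rw [PySem.Int.floordiv_eq_ediv_of_pos hDpos, hcv, hDcast, add_comm,
        Int.add_mul_ediv_right _ _ (by positivity : (2:Int) ^ w ≠ 0),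
        Int.ediv_eq_zero_of_lt hbnd.1 hbnd.2]
      ring
    have hchunks : pvChunks bs = pvChunks bs1 ++ [pvChunkVal bs2] := by
      rw [← hsplit]
      exact pvChunks_append bs1 bs2 h1mod (by rw [hlen2]; omega) (by rw [hlen2]; omega)
    rw [pvBLoop, dif_neg (show ¬ L = 0 by omega)]
    simp only [← hwdef, hmod, hdiv]
    rw [hchunks, List.reverse_append, List.reverse_singleton, List.singleton_append, pvG]
    rw [PySem.Int.mod_eq_emod_of_pos (by norm_num : (0:Int) < 113),
      PySem.Int.mod_eq_emod_of_pos (by norm_num : (0:Int) < 113)]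
    by_cases h1 : bs1 = []
    · have h0 : L - w = 0 := by rw [← hlen1, h1]; rfl
      rw [h0, h1, pvBLoop, dif_pos rfl]
      simp [pvChunks, pvG]
    · rw [← hlen1, ih bs1.length (by omega) bs1 _ _ h1 hb1 rfl]

-- ===== VERDICT =====
theorem set_checksum_spec : Claim_equal_set_checksum := by
  intro num base _ hpre
  unfold Spec_set_checksum set_checksum set_checksum_alt
  have hn : ((num.toNat : Int)) = num := Int.toNat_of_nonneg hpre
  set bs := pvBin num.toNat with hbs
  have hne : bs ≠ [] := pvBin_ne num.toNat
  have hcne : pvChunks bs ≠ [] := by rw [pvChunks]; simp [hne]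
  rw [pvALoop_eq_H, pvH_eq _ _ _ hcne, pvF_closed]
  rw [show max (PySem.Int.bitLength num) 1 = bs.length from by rw [hbs, pvBin_len, hn]]
  rw [show num = pvChunkVal bs from by rw [hbs, pvBin_val, hn]]
  rw [pvBLoop_eq_G base bs _ _ hne (pvBin_bits _), pvG_eq _ _ _ _ (by simp [hcne])]
  congr 1
  ring
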